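-- pv_equiv track=rewrite | github.com/maouzju/plunger | plunger.py | _compute_missing_suffix
-- ===== SOURCE A (Python) =====
-- def _compute_missing_suffix(current_text: str, full_text: str) -> str:
--     if not full_text:
--         return ""
--     if full_text.startswith(current_text):
--         return full_text[len(current_text):]
--
--     overlap = min(len(current_text), len(full_text))
--     while overlap > 0:
--         if current_text[-overlap:] == full_text[:overlap]:
--             return full_text[overlap:]
--         overlap -= 1
--
--     return full_text
-- ===== SOURCE B (Python) =====
-- def _compute_missing_suffix(current_text: str, full_text: str) -> str:
--     n = len(full_text)
--     # prefix function (KMP failure table) of full_text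
--     pi = [0] * n
--     k = 0
--     for i in range(1, n):
--         while k > 0 and full_text[i] != full_text[k]:
--             k = pi[k - 1]
--         if full_text[i] == full_text[k]:
--             k += 1
--         pi[i] = k
--     # run the KMP automaton over current_text; final state = longest suffix of
--     # current_text that is a prefix of full_text
--     state = 0
--     for ch in current_text:
--         while state > 0 and (state == n or ch != full_text[state]):
--             state = pi[state - 1]
--         if state < n and ch == full_text[state]:
--             state += 1
--     return full_text[state:]
-- ===== Notes on version B (the rewrite author's own statement) =====
-- stated objective: faster
-- what changed: Replaced the decreasing brute-force scan that compares a length-k suffix of current_text with a length-k prefix of full_text for every k by a KMP prefix-function table on full_text plus one automaton pass over current_text, so the longest overlap is found in linear time.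
import Mathlib
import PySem

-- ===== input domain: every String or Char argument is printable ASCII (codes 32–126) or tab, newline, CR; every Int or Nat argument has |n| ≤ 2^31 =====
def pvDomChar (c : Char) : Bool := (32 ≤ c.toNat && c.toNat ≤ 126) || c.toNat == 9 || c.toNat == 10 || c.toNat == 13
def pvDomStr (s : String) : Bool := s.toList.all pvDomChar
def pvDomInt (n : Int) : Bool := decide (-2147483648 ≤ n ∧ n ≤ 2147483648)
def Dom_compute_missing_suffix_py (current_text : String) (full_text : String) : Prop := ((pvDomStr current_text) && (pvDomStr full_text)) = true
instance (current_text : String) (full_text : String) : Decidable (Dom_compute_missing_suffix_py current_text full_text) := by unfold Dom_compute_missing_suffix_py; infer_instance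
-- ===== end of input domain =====

-- B replaces A's quadratic decreasing brute-force overlap scan by a KMP prefix-function
-- table on full_text plus one automaton pass over current_text (objective: faster).

-- ===== PORT A =====
-- A's while loop: overlap counts down; first k with current[-k:] == full[:k] wins
def pvALoop (cl fl : List Char) : Nat → List Char
  | 0 => fl
  | k + 1 =>
      if PySem.Chars.slice cl (some (-((k + 1 : Nat) : Int))) none
           = PySem.Chars.slice fl none (some ((k + 1 : Nat) : Int)) then
        PySem.Chars.slice fl (some ((k + 1 : Nat) : Int)) none
      else pvALoop cl fl k

def compute_missing_suffix_py (current_text : String) (full_text : String) : String :=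
  let cl := current_text.toList
  let fl := full_text.toList
  if fl = [] then ""
  else if PySem.Chars.startswith fl cl then
    String.ofList (PySem.Chars.slice fl (some ((cl.length : Nat) : Int)) none)
  else
    String.ofList (pvALoop cl fl (min cl.length fl.length))

-- ===== PORT B =====
-- build-loop while: while k > 0 and full[i] != full[k]: k = pi[k-1]
-- ('min … s' only guards termination; pi[s] ≤ s always holds for the table built below)
def pvFallP (piv : List Nat) (fl : List Char) (c : Char) : Nat → Nat
  | 0 => 0
  | s + 1 =>
      if fl[s + 1]? ≠ some c then pvFallP piv fl c (min (piv.getD s 0) s)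
      else s + 1
  termination_by s => s
  decreasing_by omega

-- automaton while: while state > 0 and (state == n or ch != full[state]): state = pi[state-1]
def pvFallB (piv : List Nat) (fl : List Char) (c : Char) : Nat → Nat
  | 0 => 0
  | s + 1 =>
      if s + 1 = fl.length ∨ fl[s + 1]? ≠ some c then pvFallB piv fl c (min (piv.getD s 0) s)
      else s + 1
  termination_by s => s
  decreasing_by omega

-- one iteration of the prefix-function build loop (i = 1 .. n-1)
def pvBuildStep (fl : List Char) (st : List Nat × Nat) (i : Nat) : List Nat × Nat :=
  let k1 := pvFallP st.1 fl (fl.getD i ' ') st.2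
  let k2 := if fl.getD i ' ' = fl.getD k1 ' ' then k1 + 1 else k1
  (st.1.set i k2, k2)

def pvBuildPi (fl : List Char) : List Nat :=
  ((List.range' 1 (fl.length - 1)).foldl (pvBuildStep fl) (List.replicate fl.length 0, 0)).1

-- one character of the automaton pass over current_text
def pvAutoStep (piv : List Nat) (fl : List Char) (s : Nat) (c : Char) : Nat :=
  let s1 := pvFallB piv fl c s
  if s1 < fl.length ∧ fl[s1]? = some c then s1 + 1 else s1

def compute_missing_suffix_py_alt (current_text : String) (full_text : String) : String :=
  let fl := full_text.toList
  let piv := pvBuildPi fl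
  let st := current_text.toList.foldl (pvAutoStep piv fl) 0
  String.ofList (PySem.Chars.slice fl (some ((st : Nat) : Int)) none)

-- ===== PRECONDITION & SPEC =====
def Spec_compute_missing_suffix_py (current_text : String) (full_text : String) (out : String) : Prop := out = compute_missing_suffix_py_alt current_text full_text
instance (current_text : String) (full_text : String) (out : String) : Decidable (Spec_compute_missing_suffix_py current_text full_text out) := by unfold Spec_compute_missing_suffix_py; infer_instance

-- ===== CLAIM (what is proved, stated in full; the proofs are below) =====
def Claim_equal_compute_missing_suffix_py : Prop := ∀ (current_text : String) (full_text : String), Dom_compute_missing_suffix_py current_text full_text → Spec_compute_missing_suffix_py current_text full_text (compute_missing_suffix_py current_text full_text)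

-- ===== LEMMAS AND PROOFS =====

-- the longest k ≤ min (|t|, |fl|) with fl.take k a suffix of t (the best overlap)
def pvBest (t fl : List Char) : Nat :=
  Nat.findGreatest (fun k => fl.take k <:+ t) (min t.length fl.length)

-- the prefix table is correct below index j
def PiOk (piv : List Nat) (fl : List Char) (j : Nat) : Prop :=
  ∀ m, m < j → piv.getD m 0 = Nat.findGreatest (fun k => fl.take k <:+ fl.take (m + 1)) m

theorem pv_suffix_singleton {a t : List Char} {x y : Char}
    (h : a ++ [x] <:+ t ++ [y]) : a <:+ t ∧ x = y := by
  rw [← List.reverse_prefix] at h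
  simp only [List.reverse_append, List.reverse_singleton, List.singleton_append] at h
  rw [List.cons_prefix_cons] at h
  obtain ⟨rfl, h2⟩ := h
  rw [List.reverse_prefix] at h2
  exact ⟨h2, rfl⟩

theorem pv_singleton_suffix {a t : List Char} (x : Char)
    (h : a <:+ t) : a ++ [x] <:+ t ++ [x] := by
  obtain ⟨u, rfl⟩ := h
  exact ⟨u, by simp⟩

-- a suffix of t of length k ≤ n is a suffix of fl.take s when fl.take s <:+ t, k ≤ s ≤ n
theorem pv_suffix_suffix {t fl : List Char} {k s : Nat}
    (hk : fl.take k <:+ t) (hs : fl.take s <:+ t) (hks : k ≤ s) (hsn : s ≤ fl.length) :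
    fl.take k <:+ fl.take s := by
  apply List.suffix_of_suffix_length_le hk hs
  simp only [List.length_take]
  omega

-- CHAIN SOUNDNESS for the automaton fallback
theorem pvFallB_sound (piv : List Nat) (fl : List Char) (c : Char) :
    ∀ s, PiOk piv fl s → s ≤ fl.length → ∀ t : List Char, fl.take s <:+ t →
      pvFallB piv fl c s ≤ s ∧ fl.take (pvFallB piv fl c s) <:+ t ∧
        (pvFallB piv fl c s = 0 ∨
          (pvFallB piv fl c s < fl.length ∧ fl[pvFallB piv fl c s]? = some c)) := by
  intro s
  induction s using Nat.strong_induction_on with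
  | _ s ih =>
    match s with
    | 0 =>
      intro _ _ t _
      have h0 : pvFallB piv fl c 0 = 0 := by rw [pvFallB]
      exact ⟨le_of_eq h0, by rw [h0]; simp, Or.inl h0⟩
    | s + 1 =>
      intro hpi hsn t hsuf
      rw [pvFallB]
      split
      · -- fallback step
        have hbspec := hpi s (by omega)
        have hble : piv.getD s 0 ≤ s := by rw [hbspec]; exact Nat.findGreatest_le s
        have hmin : min (piv.getD s 0) s = piv.getD s 0 := by omega
        have hbsuf : fl.take (piv.getD s 0) <:+ t := by
          have hQ : fl.take (piv.getD s 0) <:+ fl.take (s + 1) := by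
            rw [hbspec]
            exact Nat.findGreatest_spec (P := fun k => fl.take k <:+ fl.take (s + 1))
              (m := 0) (Nat.zero_le s) (by simp)
          exact hQ.trans hsuf
        rw [hmin]
        have hres := ih (piv.getD s 0) (by omega)
          (fun m hm => hpi m (by omega)) (by omega) t hbsuf
        exact ⟨by omega, hres.2.1, hres.2.2⟩
      · rename_i h
        have h1 : s + 1 ≠ fl.length := fun he => h (Or.inl he)
        have h2 : fl[s + 1]? = some c := not_not.mp (fun hne => h (Or.inr hne))
        exact ⟨le_rfl, hsuf, Or.inr ⟨by omega, h2⟩⟩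

-- CHAIN COMPLETENESS: every smaller matching overlap is below the fallback result
theorem pvFallB_complete (piv : List Nat) (fl : List Char) (c : Char) :
    ∀ s, PiOk piv fl s → s ≤ fl.length → ∀ t : List Char, fl.take s <:+ t →
      ∀ k, k ≤ s → fl.take k <:+ t → k < fl.length → fl[k]? = some c →
        k ≤ pvFallB piv fl c s := by
  intro s
  induction s using Nat.strong_induction_on with
  | _ s ih =>
    match s with
    | 0 => intro _ _ t _ k hk _ _ _; omega
    | s + 1 =>
      intro hpi hsn t hsuf k hk hksuf hkn hkc
      rcases Nat.eq_zero_or_pos k with hk0 | hkpos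
      · omega
      rw [pvFallB]
      split
      · -- the while loop falls back; k cannot be the current state
        rename_i h
        have hkne : k ≠ s + 1 := by
          rintro rfl
          rcases h with h | h
          · omega
          · exact h hkc
        -- k is a proper border-suffix of fl.take (s+1), hence k ≤ piv.getD s 0
        have hkb : fl.take k <:+ fl.take (s + 1) := pv_suffix_suffix hksuf hsuf hk hsn
        have hbspec := hpi s (by omega)
        have hkle : k ≤ piv.getD s 0 := by
          rw [hbspec]
          exact Nat.le_findGreatest (by omega) hkb
        have hble : piv.getD s 0 ≤ s := by rw [hbspec]; exact Nat.findGreatest_le s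
        have hmin : min (piv.getD s 0) s = piv.getD s 0 := by omega
        have hbsuf : fl.take (piv.getD s 0) <:+ t := by
          have hQ : fl.take (piv.getD s 0) <:+ fl.take (s + 1) := by
            rw [hbspec]
            exact Nat.findGreatest_spec (P := fun k => fl.take k <:+ fl.take (s + 1))
              (m := 0) (Nat.zero_le s) (by simp)
          exact hQ.trans hsuf
        rw [hmin]
        exact ih (piv.getD s 0) (by omega) (fun m hm => hpi m (by omega)) (by omega)
          t hbsuf k hkle hksuf hkn hkc
      · exact hk

theorem pvBest_spec (t fl : List Char) : fl.take (pvBest t fl) <:+ t :=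
  Nat.findGreatest_spec (P := fun k => fl.take k <:+ t) (m := 0) (Nat.zero_le _) (by simp)

theorem pvBest_le (t fl : List Char) : pvBest t fl ≤ min t.length fl.length :=
  Nat.findGreatest_le _

theorem pv_le_pvBest {t fl : List Char} {k : Nat} (hk : k ≤ fl.length)
    (h : fl.take k <:+ t) : k ≤ pvBest t fl := by
  have hkt : k ≤ t.length := by
    have := h.length_le
    simp only [List.length_take] at this
    omega
  exact Nat.le_findGreatest (by omega) h

-- a positive overlap of t ++ [c] decomposes into an overlap of t plus a matching char
theorem pv_overlap_succ {fl t : List Char} {c : Char} {K : Nat} (hpos : 0 < K)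
    (hKn : K ≤ fl.length) (hsuf : fl.take K <:+ t ++ [c]) :
    fl.take (K - 1) <:+ t ∧ fl[K - 1]? = some c := by
  obtain ⟨k, rfl⟩ : ∃ k, K = k + 1 := ⟨K - 1, by omega⟩
  have hklt : k < fl.length := by omega
  rw [List.take_succ_eq_append_getElem hklt] at hsuf
  obtain ⟨h1, h2⟩ := pv_suffix_singleton hsuf
  exact ⟨by simpa using h1, by simp [List.getElem?_eq_getElem hklt, h2]⟩

theorem pvAutoStep_best (piv : List Nat) (fl : List Char) (c : Char) (t : List Char)
    (hpi : PiOk piv fl fl.length) :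
    pvAutoStep piv fl (pvBest t fl) c = pvBest (t ++ [c]) fl := by
  have hsn : pvBest t fl ≤ fl.length := le_trans (pvBest_le t fl) (min_le_right _ _)
  have hpis : PiOk piv fl (pvBest t fl) := fun m hm => hpi m (by omega)
  obtain ⟨hr_le, hr_suf, hr_stop⟩ :=
    pvFallB_sound piv fl c (pvBest t fl) hpis hsn t (pvBest_spec t fl)
  unfold pvAutoStep
  by_cases hT : pvFallB piv fl c (pvBest t fl) < fl.length ∧
      fl[pvFallB piv fl c (pvBest t fl)]? = some c
  · rw [if_pos hT]
    apply le_antisymm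
    · -- r + 1 ≤ pvBest (t ++ [c])
      apply pv_le_pvBest (by omega)
      rw [List.take_succ_eq_append_getElem hT.1]
      have hcr : fl[pvFallB piv fl c (pvBest t fl)] = c := by
        have := List.getElem?_eq_getElem hT.1
        rw [this] at hT
        exact Option.some.inj hT.2
      rw [hcr]
      exact pv_singleton_suffix c hr_suf
    · -- pvBest (t ++ [c]) ≤ r + 1
      rcases Nat.eq_zero_or_pos (pvBest (t ++ [c]) fl) with h0 | hKpos
      · omega
      have hKn : pvBest (t ++ [c]) fl ≤ fl.length :=
        le_trans (pvBest_le _ fl) (min_le_right _ _)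
      obtain ⟨hk_suf, hk_c⟩ := pv_overlap_succ hKpos hKn (pvBest_spec (t ++ [c]) fl)
      have hk_s : pvBest (t ++ [c]) fl - 1 ≤ pvBest t fl :=
        pv_le_pvBest (by omega) hk_suf
      have := pvFallB_complete piv fl c (pvBest t fl) hpis hsn t (pvBest_spec t fl)
        (pvBest (t ++ [c]) fl - 1) hk_s hk_suf (by omega) hk_c
      omega
  · rw [if_neg hT]
    have hr0 : pvFallB piv fl c (pvBest t fl) = 0 := by
      rcases hr_stop with h | h
      · exact h
      · exact absurd h hT
    rw [hr0]
    -- pvBest (t ++ [c]) must be 0 as well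
    by_contra hne
    have hKpos : 0 < pvBest (t ++ [c]) fl := by omega
    have hKn : pvBest (t ++ [c]) fl ≤ fl.length :=
      le_trans (pvBest_le _ fl) (min_le_right _ _)
    obtain ⟨hk_suf, hk_c⟩ := pv_overlap_succ hKpos hKn (pvBest_spec (t ++ [c]) fl)
    have hk_s : pvBest (t ++ [c]) fl - 1 ≤ pvBest t fl := pv_le_pvBest (by omega) hk_suf
    have hk_r := pvFallB_complete piv fl c (pvBest t fl) hpis hsn t (pvBest_spec t fl)
      (pvBest (t ++ [c]) fl - 1) hk_s hk_suf (by omega) hk_c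
    have hk0 : pvBest (t ++ [c]) fl - 1 = 0 := by omega
    rw [hk0] at hk_c
    rw [hr0] at hT
    exact hT ⟨by omega, hk_c⟩

theorem pvFold_best (piv : List Nat) (fl : List Char) (hpi : PiOk piv fl fl.length) :
    ∀ (rest t : List Char), List.foldl (pvAutoStep piv fl) (pvBest t fl) rest = pvBest (t ++ rest) fl := by
  intro rest
  induction rest with
  | nil => intro t; simp
  | cons c rest ih =>
    intro t
    have h1 : List.foldl (pvAutoStep piv fl) (pvBest t fl) (c :: rest)
        = List.foldl (pvAutoStep piv fl) (pvBest (t ++ [c]) fl) rest := by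
      rw [List.foldl_cons, pvAutoStep_best piv fl c t hpi]
    rw [h1, ih (t ++ [c])]
    simp

theorem pvFallP_eq_pvFallB (piv : List Nat) (fl : List Char) (c : Char) :
    ∀ s, s < fl.length → pvFallP piv fl c s = pvFallB piv fl c s := by
  intro s
  induction s using Nat.strong_induction_on with
  | _ s ih =>
    match s with
    | 0 => intro _; rw [pvFallP, pvFallB]
    | s + 1 =>
      intro hlt
      rw [pvFallP, pvFallB]
      have hne : ¬ (s + 1 = fl.length) := by omega
      simp only [hne, false_or]
      split
      · exact ih _ (by omega) (by omega)
      · rfl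

-- one build-loop iteration computes the prefix-function value at index j + 1
theorem pvBuildStep_correct (fl : List Char) (piv : List Nat) (k j : Nat)
    (hlen : piv.length = fl.length)
    (hpi : PiOk piv fl (j + 1))
    (hk : k = Nat.findGreatest (fun k' => fl.take k' <:+ fl.take (j + 1)) j)
    (hj : j + 1 < fl.length) :
    (pvBuildStep fl (piv, k) (j + 1)).1.length = fl.length ∧
    (pvBuildStep fl (piv, k) (j + 1)).2
        = Nat.findGreatest (fun k' => fl.take k' <:+ fl.take (j + 2)) (j + 1) ∧
    PiOk (pvBuildStep fl (piv, k) (j + 1)).1 fl (j + 2) := by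
  have hkle : k ≤ j := by rw [hk]; exact Nat.findGreatest_le j
  have hksuf : fl.take k <:+ fl.take (j + 1) := by
    rw [hk]
    exact Nat.findGreatest_spec (P := fun k' => fl.take k' <:+ fl.take (j + 1))
      (m := 0) (Nat.zero_le j) (by simp)
  have hfp : pvFallP piv fl (fl.getD (j + 1) ' ') k
      = pvFallB piv fl (fl.getD (j + 1) ' ') k :=
    pvFallP_eq_pvFallB piv fl _ k (by omega)
  have hpis : PiOk piv fl k := fun m hm => hpi m (by omega)
  obtain ⟨hr_le, hr_suf, hr_stop⟩ :=
    pvFallB_sound piv fl (fl.getD (j + 1) ' ') k hpis (by omega) (fl.take (j + 1)) hksuf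
  have hcd : fl.getD (j + 1) ' ' = fl[j + 1] := List.getD_eq_getElem fl ' ' hj
  have hrd : fl.getD (pvFallB piv fl (fl.getD (j + 1) ' ') k) ' '
      = fl[pvFallB piv fl (fl.getD (j + 1) ' ') k]'(by omega) :=
    List.getD_eq_getElem fl ' ' (by omega)
  have htake2 : fl.take (j + 2) = fl.take (j + 1) ++ [fl[j + 1]] :=
    List.take_succ_eq_append_getElem hj
  have hstep : pvBuildStep fl (piv, k) (j + 1)
      = (piv.set (j + 1)
          (if fl.getD (j + 1) ' '
              = fl.getD (pvFallP piv fl (fl.getD (j + 1) ' ') k) ' ' then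
            pvFallP piv fl (fl.getD (j + 1) ' ') k + 1
          else pvFallP piv fl (fl.getD (j + 1) ' ') k),
         if fl.getD (j + 1) ' '
              = fl.getD (pvFallP piv fl (fl.getD (j + 1) ' ') k) ' ' then
            pvFallP piv fl (fl.getD (j + 1) ' ') k + 1
          else pvFallP piv fl (fl.getD (j + 1) ' ') k) := rfl
  -- the new state value is the prefix-function value at index j + 1
  have hk2 : (if fl.getD (j + 1) ' '
          = fl.getD (pvFallP piv fl (fl.getD (j + 1) ' ') k) ' ' then
        pvFallP piv fl (fl.getD (j + 1) ' ') k + 1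
      else pvFallP piv fl (fl.getD (j + 1) ' ') k)
      = Nat.findGreatest (fun k' => fl.take k' <:+ fl.take (j + 2)) (j + 1) := by
    rw [hfp]
    by_cases hmatch : fl.getD (j + 1) ' '
        = fl.getD (pvFallB piv fl (fl.getD (j + 1) ' ') k) ' '
    · rw [if_pos hmatch]
      apply le_antisymm
      · -- r + 1 is a candidate overlap of fl.take (j + 2)
        apply Nat.le_findGreatest (by omega)
        show fl.take (pvFallB piv fl (fl.getD (j + 1) ' ') k + 1) <:+ fl.take (j + 2)
        rw [List.take_succ_eq_append_getElem (by omega), htake2]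
        have : fl[pvFallB piv fl (fl.getD (j + 1) ' ') k]'(by omega) = fl[j + 1] := by
          rw [← hrd, ← hmatch, hcd]
        rw [this]
        exact pv_singleton_suffix _ hr_suf
      · rcases Nat.eq_zero_or_pos
            (Nat.findGreatest (fun k' => fl.take k' <:+ fl.take (j + 2)) (j + 1))
          with h0 | hKpos
        · omega
        have hKle : Nat.findGreatest (fun k' => fl.take k' <:+ fl.take (j + 2)) (j + 1)
            ≤ j + 1 := Nat.findGreatest_le (j + 1)
        obtain ⟨hk_suf, hk_c⟩ := pv_overlap_succ (fl := fl) (t := fl.take (j + 1))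
          (c := fl[j + 1]) hKpos (by omega)
          (by rw [← htake2]
              exact Nat.findGreatest_spec
                (P := fun k' => fl.take k' <:+ fl.take (j + 2)) (m := 0)
                (Nat.zero_le (j + 1)) (by simp))
        have hk_k : Nat.findGreatest (fun k' => fl.take k' <:+ fl.take (j + 2)) (j + 1) - 1
            ≤ k := by
          rw [hk]
          exact Nat.le_findGreatest (by omega) hk_suf
        have := pvFallB_complete piv fl (fl.getD (j + 1) ' ') k hpis (by omega)
          (fl.take (j + 1)) hksuf
          (Nat.findGreatest (fun k' => fl.take k' <:+ fl.take (j + 2)) (j + 1) - 1)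
          hk_k hk_suf (by omega) (by rw [hcd]; exact hk_c)
        omega
    · rw [if_neg hmatch]
      have hr0 : pvFallB piv fl (fl.getD (j + 1) ' ') k = 0 := by
        rcases hr_stop with h | h
        · exact h
        · exfalso
          apply hmatch
          rw [hrd]
          have := List.getElem?_eq_getElem (l := fl)
            (i := pvFallB piv fl (fl.getD (j + 1) ' ') k) (by omega)
          rw [this] at h
          exact (Option.some.inj h.2).symm
      rw [hr0]
      by_contra hne
      have hKpos : 0 < Nat.findGreatest (fun k' => fl.take k' <:+ fl.take (j + 2)) (j + 1) := by
        omega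
      obtain ⟨hk_suf, hk_c⟩ := pv_overlap_succ (fl := fl) (t := fl.take (j + 1))
        (c := fl[j + 1]) hKpos (le_trans (Nat.findGreatest_le (j + 1)) (by omega))
        (by rw [← htake2]
            exact Nat.findGreatest_spec
              (P := fun k' => fl.take k' <:+ fl.take (j + 2)) (m := 0)
              (Nat.zero_le (j + 1)) (by simp))
      have hk_k : Nat.findGreatest (fun k' => fl.take k' <:+ fl.take (j + 2)) (j + 1) - 1
          ≤ k := by
        rw [hk]
        exact Nat.le_findGreatest
          (by have := Nat.findGreatest_le (P := fun k' => fl.take k' <:+ fl.take (j + 2)) (j + 1); omega)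
          hk_suf
      have hcomp := pvFallB_complete piv fl (fl.getD (j + 1) ' ') k hpis (by omega)
        (fl.take (j + 1)) hksuf
        (Nat.findGreatest (fun k' => fl.take k' <:+ fl.take (j + 2)) (j + 1) - 1)
        hk_k hk_suf
        (by have := Nat.findGreatest_le (P := fun k' => fl.take k' <:+ fl.take (j + 2)) (j + 1); omega)
        (by rw [hcd]; exact hk_c)
      rw [hr0] at hcomp
      -- so the matching overlap has length 1 and fl[0] = fl[j+1], contradicting hmatch
      apply hmatch
      rw [hr0, hcd, List.getD_eq_getElem fl ' ' (show 0 < fl.length by omega)]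
      have h00 : Nat.findGreatest (fun k' => fl.take k' <:+ fl.take (j + 2)) (j + 1) - 1 = 0 := by
        omega
      rw [h00] at hk_c
      have hg := List.getElem?_eq_getElem (l := fl) (i := 0) (show 0 < fl.length by omega)
      rw [hg] at hk_c
      exact (Option.some.inj hk_c).symm
  refine ⟨?_, ?_, ?_⟩
  · rw [hstep]
    simp [List.length_set, hlen]
  · rw [hstep]
    exact hk2
  · rw [hstep]
    intro m hm
    by_cases hmi : m = j + 1
    · subst hmi
      rw [show ((piv.set (j + 1)
          (if fl.getD (j + 1) ' '
              = fl.getD (pvFallP piv fl (fl.getD (j + 1) ' ') k) ' ' then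
            pvFallP piv fl (fl.getD (j + 1) ' ') k + 1
          else pvFallP piv fl (fl.getD (j + 1) ' ') k)).getD (j + 1) 0)
          = (if fl.getD (j + 1) ' '
              = fl.getD (pvFallP piv fl (fl.getD (j + 1) ' ') k) ' ' then
            pvFallP piv fl (fl.getD (j + 1) ' ') k + 1
          else pvFallP piv fl (fl.getD (j + 1) ' ') k) from by
        simp [List.getD_eq_getElem?_getD, hlen ▸ hj]]
      exact hk2
    · have hne : j + 1 ≠ m := fun he => hmi he.symm
      rw [show ((piv.set (j + 1)
          (if fl.getD (j + 1) ' '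
              = fl.getD (pvFallP piv fl (fl.getD (j + 1) ' ') k) ' ' then
            pvFallP piv fl (fl.getD (j + 1) ' ') k + 1
          else pvFallP piv fl (fl.getD (j + 1) ' ') k)).getD m 0) = piv.getD m 0 from by
        simp [List.getD_eq_getElem?_getD, hne]]
      exact hpi m (by omega)

-- invariant of the build fold
theorem pvBuild_inv (fl : List Char) :
    ∀ j, j ≤ fl.length - 1 →
      ((List.range' 1 j).foldl (pvBuildStep fl) (List.replicate fl.length 0, 0)).1.length
          = fl.length ∧
      ((List.range' 1 j).foldl (pvBuildStep fl) (List.replicate fl.length 0, 0)).2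
          = Nat.findGreatest (fun k' => fl.take k' <:+ fl.take (j + 1)) j ∧
      PiOk ((List.range' 1 j).foldl (pvBuildStep fl) (List.replicate fl.length 0, 0)).1
        fl (j + 1) := by
  intro j
  induction j with
  | zero =>
    intro _
    refine ⟨by simp, by simp, ?_⟩
    intro m hm
    have hm0 : m = 0 := by omega
    subst hm0
    simp [List.getD_eq_getElem?_getD, List.getElem?_replicate]
    split <;> simp
  | succ j ih =>
    intro hj
    obtain ⟨ih1, ih2, ih3⟩ := ih (by omega)
    have hcat : List.range' 1 (j + 1) = List.range' 1 j ++ [j + 1] := by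
      rw [List.range'_concat]
      simp [Nat.add_comm]
    rw [hcat, List.foldl_append, List.foldl_cons, List.foldl_nil]
    have hst : ((List.range' 1 j).foldl (pvBuildStep fl) (List.replicate fl.length 0, 0))
        = (((List.range' 1 j).foldl (pvBuildStep fl) (List.replicate fl.length 0, 0)).1,
           ((List.range' 1 j).foldl (pvBuildStep fl) (List.replicate fl.length 0, 0)).2) := rfl
    rw [hst, ih2]
    exact pvBuildStep_correct fl _ _ j ih1 ih3 rfl (by omega)

theorem pvBuildPi_ok (fl : List Char) : PiOk (pvBuildPi fl) fl fl.length := by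
  unfold pvBuildPi
  rcases Nat.eq_zero_or_pos fl.length with h0 | hpos
  · intro m hm
    omega
  · have h := (pvBuild_inv fl (fl.length - 1) le_rfl).2.2
    have heq : fl.length - 1 + 1 = fl.length := by omega
    rw [heq] at h
    exact h


-- B computes fl.drop (pvBest cl fl)
theorem pvB_eq (ct ft : String) :
    compute_missing_suffix_py_alt ct ft
      = String.ofList (ft.toList.drop (pvBest ct.toList ft.toList)) := by
  unfold compute_missing_suffix_py_alt
  have hnil : pvBest ([] : List Char) ft.toList = 0 := by
    unfold pvBest
    simp
  have h := pvFold_best (pvBuildPi ft.toList) ft.toList (pvBuildPi_ok ft.toList)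
    ct.toList []
  rw [hnil] at h
  simp only [List.nil_append] at h
  dsimp only
  rw [h]
  unfold PySem.Chars.slice
  rw [PySem.List.slice_from_natCast]

-- A's loop test for overlap j is exactly 'fl.take j is a suffix of cl'
theorem pvALoop_test {cl fl : List Char} {j : Nat} (hj1 : 0 < j)
    (hjc : j ≤ cl.length) (hjf : j ≤ fl.length) :
    (PySem.Chars.slice cl (some (-(j : Int))) none
        = PySem.Chars.slice fl none (some (j : Int))) ↔ fl.take j <:+ cl := by
  unfold PySem.Chars.slice
  rw [PySem.List.slice_from_neg_natCast cl j hj1, PySem.List.slice_to_natCast]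
  constructor
  · intro h
    rw [← h]
    exact List.drop_suffix _ _
  · intro h
    have := List.suffix_iff_eq_drop.mp h
    simp only [List.length_take] at this
    rw [this]
    congr 1
    omega

theorem pvALoop_eq (cl fl : List Char) :
    ∀ j, j ≤ cl.length → j ≤ fl.length →
      pvALoop cl fl j = fl.drop (Nat.findGreatest (fun k => fl.take k <:+ cl) j) := by
  intro j
  induction j with
  | zero => intro _ _; simp [pvALoop]
  | succ j ih =>
    intro hjc hjf
    rw [pvALoop, Nat.findGreatest_succ]
    rw [if_congr (pvALoop_test (by omega) hjc hjf) rfl rfl]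
    split
    · exact PySem.List.slice_from_natCast fl (j + 1)
    · exact ih (by omega) (by omega)

-- A computes fl.drop (pvBest cl fl)
theorem pvA_eq (ct ft : String) :
    compute_missing_suffix_py ct ft
      = String.ofList (ft.toList.drop (pvBest ct.toList ft.toList)) := by
  unfold compute_missing_suffix_py
  by_cases hnil : ft.toList = []
  · simp [hnil]
  rw [if_neg hnil]
  by_cases hpre : PySem.Chars.startswith ft.toList ct.toList
  · rw [if_pos hpre]
    have hp : ct.toList <+: ft.toList := (PySem.Chars.startswith_iff _ _).mp hpre
    have hlen : ct.toList.length ≤ ft.toList.length := hp.length_le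
    have hbest : pvBest ct.toList ft.toList = ct.toList.length := by
      apply le_antisymm
      · exact le_trans (pvBest_le _ _) (min_le_left _ _)
      · apply pv_le_pvBest hlen
        have : ft.toList.take ct.toList.length = ct.toList :=
          (List.prefix_iff_eq_take.mp hp).symm
        rw [this]
    rw [hbest]
    unfold PySem.Chars.slice
    rw [PySem.List.slice_from_natCast]
  · rw [if_neg hpre]
    rw [pvALoop_eq ct.toList ft.toList (min ct.toList.length ft.toList.length)
      (min_le_left _ _) (min_le_right _ _)]
    rfl

-- ===== VERDICT (by name: the statement is the Claim_ definition above) =====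
theorem compute_missing_suffix_py_spec : Claim_equal_compute_missing_suffix_py := by
  intro ct ft _
  unfold Spec_compute_missing_suffix_py
  rw [pvA_eq, pvB_eq]
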